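-- pv_equiv track=rewrite | github.com/bond005/deep_ner | deep_ner/elmo_ner.py | calculate_bounds_of_named_entities
-- ===== SOURCE A (Python) =====
-- from typing import Dict, Union, List, Tuple
--
-- def calculate_bounds_of_named_entities(bounds_of_tokens: List[Tuple[int, int]], classes_list: tuple,
--                                        token_labels: List[int]) -> Dict[str, List[Tuple[int, int]]]:
--     named_entities_for_text = dict()
--     ne_start = -1
--     ne_type = ''
--     n_tokens = len(bounds_of_tokens)
--     for token_idx in range(n_tokens):
--         class_id = token_labels[token_idx]
--         if (class_id > 0) and ((class_id - 1) // 2 < len(classes_list)):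
--             if ne_start < 0:
--                 ne_start = token_idx
--                 ne_type = classes_list[(class_id - 1) // 2]
--             else:
--                 if class_id % 2 == 0:
--                     if ne_type in named_entities_for_text:
--                         named_entities_for_text[ne_type].append(
--                             (bounds_of_tokens[ne_start][0], bounds_of_tokens[token_idx - 1][1])
--                         )
--                     else:
--                         named_entities_for_text[ne_type] = [
--                             (bounds_of_tokens[ne_start][0], bounds_of_tokens[token_idx - 1][1])
--                         ]
--                     ne_start = token_idx
--                     ne_type = classes_list[(class_id - 1) // 2]
--                 else:
--                     if classes_list[(class_id - 1) // 2] != ne_type: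
--                         if ne_type in named_entities_for_text:
--                             named_entities_for_text[ne_type].append(
--                                 (bounds_of_tokens[ne_start][0], bounds_of_tokens[token_idx - 1][1])
--                             )
--                         else:
--                             named_entities_for_text[ne_type] = [
--                                 (bounds_of_tokens[ne_start][0], bounds_of_tokens[token_idx - 1][1])
--                             ]
--                         ne_start = token_idx
--                         ne_type = classes_list[(class_id - 1) // 2]
--         else:
--             if ne_start >= 0:
--                 if ne_type in named_entities_for_text:
--                     named_entities_for_text[ne_type].append(
--                         (bounds_of_tokens[ne_start][0], bounds_of_tokens[token_idx - 1][1])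
--                     )
--                 else:
--                     named_entities_for_text[ne_type] = [
--                         (bounds_of_tokens[ne_start][0], bounds_of_tokens[token_idx - 1][1])
--                     ]
--                 ne_start = -1
--                 ne_type = ''
--     if ne_start >= 0:
--         if ne_type in named_entities_for_text:
--             named_entities_for_text[ne_type].append(
--                 (bounds_of_tokens[ne_start][0], bounds_of_tokens[-1][1])
--             )
--         else:
--             named_entities_for_text[ne_type] = [
--                 (bounds_of_tokens[ne_start][0], bounds_of_tokens[-1][1])
--             ]
--     return named_entities_for_text
-- ===== SOURCE B (Python) =====
-- def calculate_bounds_of_named_entities(bounds_of_tokens, classes_list, token_labels):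
--     # Boundary-marking approach: an entity span's start/end positions are each
--     # decidable from a LOCAL look at two neighbouring labels, so mark all span
--     # starts and all span ends independently, then zip them pairwise.
--     n = len(bounds_of_tokens)
--
--     def typ(i):
--         # entity type of token i, or None if token i is not a valid entity token
--         cid = token_labels[i]
--         if cid > 0 and (cid - 1) // 2 < len(classes_list):
--             return classes_list[(cid - 1) // 2]
--         return None
--
--     def begins(i):
--         # a span starts at i iff i is an entity token that does not continue its
--         # predecessor (continuation = odd tag of the same type as token i-1)
--         if typ(i) is None:
--             return False
--         return (i == 0 or typ(i - 1) is None
--                 or token_labels[i] % 2 == 0 or typ(i) != typ(i - 1))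
--
--     starts = [i for i in range(n) if begins(i)]
--     ends = [i for i in range(n)
--             if typ(i) is not None and (i == n - 1 or typ(i + 1) is None or begins(i + 1))]
--
--     result = {}
--     for s, e in zip(starts, ends):
--         result.setdefault(typ(s), []).append((bounds_of_tokens[s][0], bounds_of_tokens[e][1]))
--     return result
-- ===== Notes on version B (the rewrite author's own statement) =====
-- stated objective: alternative
-- what changed: A is a single-pass state machine that tracks an open span and writes the dict inline; B keeps no running state: it decides span starts and span ends by a local two-token predicate, lists all start indices and all end indices with two independent filters, zips them pairwise and groups the zipped spans into the dict.
import Mathlib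
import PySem

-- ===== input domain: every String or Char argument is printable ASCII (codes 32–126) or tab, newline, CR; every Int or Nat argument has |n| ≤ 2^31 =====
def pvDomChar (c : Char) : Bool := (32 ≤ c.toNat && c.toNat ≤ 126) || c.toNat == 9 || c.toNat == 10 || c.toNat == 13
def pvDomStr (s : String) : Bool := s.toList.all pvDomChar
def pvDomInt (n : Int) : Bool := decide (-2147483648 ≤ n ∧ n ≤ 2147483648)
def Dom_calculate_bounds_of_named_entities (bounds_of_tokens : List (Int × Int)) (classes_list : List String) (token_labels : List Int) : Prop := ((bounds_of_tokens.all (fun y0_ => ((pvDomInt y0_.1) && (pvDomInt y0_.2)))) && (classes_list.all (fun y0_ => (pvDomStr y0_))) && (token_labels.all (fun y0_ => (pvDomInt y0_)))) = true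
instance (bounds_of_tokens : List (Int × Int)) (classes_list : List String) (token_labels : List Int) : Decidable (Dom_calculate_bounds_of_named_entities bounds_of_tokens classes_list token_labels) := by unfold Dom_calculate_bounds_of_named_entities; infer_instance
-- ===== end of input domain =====

-- B replaces A's single-pass inline-dict state machine by boundary marking: span starts and
-- span ends are each decided by a LOCAL two-token predicate, listed independently, and zipped.


-- ===== PORT A =====
-- Python "if ne_type in d: d[ne_type].append(pr) else: d[ne_type] = [pr]" = d.modify ne_type [] (· ++ [pr])
def pvEmit (d : PySem.Dict String (List (Int × Int))) (ty : String) (pr : Int × Int) :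
    PySem.Dict String (List (Int × Int)) :=
  d.modify ty [] (· ++ [pr])

-- one iteration of A's loop body; state = (named_entities_for_text, ne_start, ne_type)
-- token_labels[token_idx] is total via getD 0: under Pre_ the index is in range
def pvStepA (bounds_of_tokens : List (Int × Int)) (classes_list : List String)
    (token_labels : List Int)
    (st : PySem.Dict String (List (Int × Int)) × Int × String) (token_idx : Int) :
    PySem.Dict String (List (Int × Int)) × Int × String :=
  let d := st.1
  let ne_start := st.2.1
  let ne_type := st.2.2
  let class_id := (PySem.List.pyGet? token_labels token_idx).getD 0
  if class_id > 0 ∧ PySem.Int.floordiv (class_id - 1) 2 < PySem.List.len classes_list then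
    if ne_start < 0 then
      (d, token_idx, (PySem.List.pyGet? classes_list (PySem.Int.floordiv (class_id - 1) 2)).getD "")
    else
      if PySem.Int.mod class_id 2 = 0 then
        (pvEmit d ne_type (((PySem.List.pyGet? bounds_of_tokens ne_start).getD (0, 0)).1,
            ((PySem.List.pyGet? bounds_of_tokens (token_idx - 1)).getD (0, 0)).2),
         token_idx, (PySem.List.pyGet? classes_list (PySem.Int.floordiv (class_id - 1) 2)).getD "")
      else
        if (PySem.List.pyGet? classes_list (PySem.Int.floordiv (class_id - 1) 2)).getD "" ≠ ne_type then
          (pvEmit d ne_type (((PySem.List.pyGet? bounds_of_tokens ne_start).getD (0, 0)).1,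
              ((PySem.List.pyGet? bounds_of_tokens (token_idx - 1)).getD (0, 0)).2),
           token_idx, (PySem.List.pyGet? classes_list (PySem.Int.floordiv (class_id - 1) 2)).getD "")
        else
          (d, ne_start, ne_type)
  else
    if ne_start ≥ 0 then
      (pvEmit d ne_type (((PySem.List.pyGet? bounds_of_tokens ne_start).getD (0, 0)).1,
          ((PySem.List.pyGet? bounds_of_tokens (token_idx - 1)).getD (0, 0)).2),
       -1, "")
    else
      (d, ne_start, ne_type)

def calculate_bounds_of_named_entities (bounds_of_tokens : List (Int × Int))
    (classes_list : List String) (token_labels : List Int) : List (String × List (Int × Int)) :=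
  let n_tokens := PySem.List.len bounds_of_tokens
  let st := (PySem.List.pyRange 0 n_tokens 1).foldl
    (pvStepA bounds_of_tokens classes_list token_labels) (PySem.Dict.empty, -1, "")
  (if st.2.1 ≥ 0 then
    pvEmit st.1 st.2.2 (((PySem.List.pyGet? bounds_of_tokens st.2.1).getD (0, 0)).1,
      ((PySem.List.pyGet? bounds_of_tokens (-1)).getD (0, 0)).2)
  else st.1).items

-- ===== PORT B =====
-- typ(i): entity type of token i, none if token i is not a valid entity token
def pvTyp? (classes_list : List String) (token_labels : List Int) (i : Int) : Option String :=
  let cid := (PySem.List.pyGet? token_labels i).getD 0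
  if cid > 0 ∧ PySem.Int.floordiv (cid - 1) 2 < PySem.List.len classes_list then
    some ((PySem.List.pyGet? classes_list (PySem.Int.floordiv (cid - 1) 2)).getD "")
  else
    none

-- begins(i): a span starts at i iff i is an entity token not continuing its predecessor
def pvBegins (classes_list : List String) (token_labels : List Int) (i : Int) : Bool :=
  (pvTyp? classes_list token_labels i).isSome &&
    (i == 0 || (pvTyp? classes_list token_labels (i - 1)).isNone ||
      PySem.Int.mod ((PySem.List.pyGet? token_labels i).getD 0) 2 == 0 ||
      pvTyp? classes_list token_labels i != pvTyp? classes_list token_labels (i - 1))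

-- ends(i): a span ends at i iff i is an entity token and i+1 does not continue it
def pvEndsAt (classes_list : List String) (token_labels : List Int) (n i : Int) : Bool :=
  (pvTyp? classes_list token_labels i).isSome &&
    (i == n - 1 || (pvTyp? classes_list token_labels (i + 1)).isNone ||
      pvBegins classes_list token_labels (i + 1))

def calculate_bounds_of_named_entities_alt (bounds_of_tokens : List (Int × Int))
    (classes_list : List String) (token_labels : List Int) : List (String × List (Int × Int)) :=
  let n := PySem.List.len bounds_of_tokens
  let starts := (PySem.List.pyRange 0 n 1).filter (pvBegins classes_list token_labels)
  let ends := (PySem.List.pyRange 0 n 1).filter (pvEndsAt classes_list token_labels n)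
  -- python typ(s) is a string here (begins s holds); ported as .getD ""
  ((starts.zip ends).foldl (fun d se =>
      pvEmit d ((pvTyp? classes_list token_labels se.1).getD "")
        (((PySem.List.pyGet? bounds_of_tokens se.1).getD (0, 0)).1,
         ((PySem.List.pyGet? bounds_of_tokens se.2).getD (0, 0)).2)) PySem.Dict.empty).items

-- ===== PRECONDITION & SPEC =====
-- Pre_ excludes exactly the inputs where A raises IndexError: token_labels shorter than bounds_of_tokens.
def Pre_calculate_bounds_of_named_entities (bounds_of_tokens : List (Int × Int)) (classes_list : List String) (token_labels : List Int) : Prop :=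
  bounds_of_tokens.length ≤ token_labels.length
instance (bounds_of_tokens : List (Int × Int)) (classes_list : List String) (token_labels : List Int) : Decidable (Pre_calculate_bounds_of_named_entities bounds_of_tokens classes_list token_labels) := by unfold Pre_calculate_bounds_of_named_entities; infer_instance

def pvWitness_calculate_bounds_of_named_entities : (List (Int × Int)) × List String × List Int :=
  ([(0, 3), (4, 7), (8, 11)], ["PER", "LOC"], [1, 1, 4])

def Spec_calculate_bounds_of_named_entities (bounds_of_tokens : List (Int × Int)) (classes_list : List String) (token_labels : List Int) (out : List (String × List (Int × Int))) : Prop := out = calculate_bounds_of_named_entities_alt bounds_of_tokens classes_list token_labels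
instance (bounds_of_tokens : List (Int × Int)) (classes_list : List String) (token_labels : List Int) (out : List (String × List (Int × Int))) : Decidable (Spec_calculate_bounds_of_named_entities bounds_of_tokens classes_list token_labels out) := by unfold Spec_calculate_bounds_of_named_entities; infer_instance

-- ===== CLAIM (what is proved, stated in full; the proofs are below) =====
def Claim_equal_calculate_bounds_of_named_entities : Prop := ∀ (bounds_of_tokens : List (Int × Int)) (classes_list : List String) (token_labels : List Int), Dom_calculate_bounds_of_named_entities bounds_of_tokens classes_list token_labels → Pre_calculate_bounds_of_named_entities bounds_of_tokens classes_list token_labels → Spec_calculate_bounds_of_named_entities bounds_of_tokens classes_list token_labels (calculate_bounds_of_named_entities bounds_of_tokens classes_list token_labels)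

-- ===== LEMMAS AND PROOFS =====

-- proof-only intermediate: the run-extraction state machine (spans, open run)
def pvRunsStep (classes_list : List String) (token_labels : List Int)
    (st : List (String × Int × Int) × Option (String × Int)) (i : Int) :
    List (String × Int × Int) × Option (String × Int) :=
  let spans := st.1
  let cid := (PySem.List.pyGet? token_labels i).getD 0
  if cid > 0 ∧ PySem.Int.floordiv (cid - 1) 2 < PySem.List.len classes_list then
    let ty := (PySem.List.pyGet? classes_list (PySem.Int.floordiv (cid - 1) 2)).getD ""
    match st.2 with
    | some cur =>
      if PySem.Int.mod cid 2 = 1 ∧ ty = cur.1 then (spans, some cur)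
      else (spans ++ [(cur.1, cur.2, i - 1)], some (ty, i))
    | none => (spans, some (ty, i))
  else
    match st.2 with
    | some cur => (spans ++ [(cur.1, cur.2, i - 1)], none)
    | none => (spans, none)

-- resolve a closed run against the token bounds (setdefault/append on the dict)
def pvAddSpan (bounds_of_tokens : List (Int × Int))
    (d : PySem.Dict String (List (Int × Int))) (sp : String × Int × Int) :
    PySem.Dict String (List (Int × Int)) :=
  pvEmit d sp.1 (((PySem.List.pyGet? bounds_of_tokens sp.2.1).getD (0, 0)).1,
    ((PySem.List.pyGet? bounds_of_tokens sp.2.2).getD (0, 0)).2)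

def pvRunsFinal (classes_list : List String) (token_labels : List Int) (n : Int) :
    List (String × Int × Int) :=
  let st := (PySem.List.pyRange 0 n 1).foldl (pvRunsStep classes_list token_labels) ([], none)
  match st.2 with
  | some cur => st.1 ++ [(cur.1, cur.2, n - 1)]
  | none => st.1

-- STAGE 1: A's inline-dict machine equals resolving the run list.
-- relation: A's dict is the resolution of the closed runs, A's (ne_start, ne_type) mirrors the open run
def pvRel (bounds_of_tokens : List (Int × Int)) (n : Int)
    (stA : PySem.Dict String (List (Int × Int)) × Int × String)
    (stB : List (String × Int × Int) × Option (String × Int)) : Prop :=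
  stA.1 = stB.1.foldl (pvAddSpan bounds_of_tokens) PySem.Dict.empty ∧
  ((stA.2.1 < 0 ∧ stB.2 = none) ∨
   (0 ≤ stA.2.1 ∧ stA.2.1 < n ∧ stB.2 = some (stA.2.2, stA.2.1)))

lemma pvStep_rel (bounds_of_tokens : List (Int × Int)) (classes_list : List String)
    (token_labels : List Int) (n : Int) (stA : _) (stB : _) (i : Int)
    (hi : 0 ≤ i ∧ i < n)
    (h : pvRel bounds_of_tokens n stA stB) :
    pvRel bounds_of_tokens n
      (pvStepA bounds_of_tokens classes_list token_labels stA i)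
      (pvRunsStep classes_list token_labels stB i) := by
  obtain ⟨hd, hst⟩ := h
  simp only [pvStepA, pvRunsStep]
  set cid := (PySem.List.pyGet? token_labels i).getD 0 with hcid
  by_cases hc : cid > 0 ∧ PySem.Int.floordiv (cid - 1) 2 < PySem.List.len classes_list
  · simp only [if_pos hc]
    rcases hst with ⟨hs, hB⟩ | ⟨hs0, hsn, hB⟩
    · rw [hB]
      simp only [if_pos hs]
      exact ⟨hd, Or.inr ⟨hi.1, hi.2, rfl⟩⟩
    · rw [hB]
      simp only [if_neg (by omega : ¬ stA.2.1 < 0)]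
      by_cases hm : PySem.Int.mod cid 2 = 0
      · have hm1 : ¬ (PySem.Int.mod cid 2 = 1 ∧
            (PySem.List.pyGet? classes_list (PySem.Int.floordiv (cid - 1) 2)).getD "" = stA.2.2) := by
          intro hh; omega
        simp only [if_pos hm, if_neg hm1]
        refine ⟨?_, Or.inr ⟨hi.1, hi.2, rfl⟩⟩
        simp [List.foldl_append, hd, pvAddSpan]
      · have hm1 : PySem.Int.mod cid 2 = 1 := by
          have h1 := PySem.Int.mod_nonneg cid (by norm_num : (0:Int) < 2)
          have h2 := PySem.Int.mod_lt cid (by norm_num : (0:Int) < 2)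
          omega
        simp only [if_neg hm]
        by_cases hty : (PySem.List.pyGet? classes_list (PySem.Int.floordiv (cid - 1) 2)).getD "" = stA.2.2
        · have hcond : PySem.Int.mod cid 2 = 1 ∧ (PySem.List.pyGet? classes_list (PySem.Int.floordiv (cid - 1) 2)).getD "" = stA.2.2 := ⟨hm1, hty⟩
          simp only [if_neg (show ¬ ((PySem.List.pyGet? classes_list (PySem.Int.floordiv (cid - 1) 2)).getD "" ≠ stA.2.2) from fun hh => hh hty), if_pos hcond]
          exact ⟨hd, Or.inr ⟨hs0, hsn, rfl⟩⟩
        · have hcond : ¬ (PySem.Int.mod cid 2 = 1 ∧ (PySem.List.pyGet? classes_list (PySem.Int.floordiv (cid - 1) 2)).getD "" = stA.2.2) := fun hh => hty hh.2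
          simp only [if_pos hty, if_neg hcond]
          refine ⟨?_, Or.inr ⟨hi.1, hi.2, rfl⟩⟩
          simp [List.foldl_append, hd, pvAddSpan]
  · simp only [if_neg hc]
    rcases hst with ⟨hs, hB⟩ | ⟨hs0, hsn, hB⟩
    · rw [hB]
      simp only [if_neg (by omega : ¬ stA.2.1 ≥ 0)]
      exact ⟨hd, Or.inl ⟨hs, rfl⟩⟩
    · rw [hB]
      simp only [if_pos (by omega : stA.2.1 ≥ 0)]
      refine ⟨?_, Or.inl ⟨by norm_num, rfl⟩⟩
      simp [List.foldl_append, hd, pvAddSpan]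

lemma pvLoop_rel (bounds_of_tokens : List (Int × Int)) (classes_list : List String)
    (token_labels : List Int) (n : Int) :
    ∀ (idxs : List Int) (stA : _) (stB : _),
      (∀ i ∈ idxs, 0 ≤ i ∧ i < n) →
      pvRel bounds_of_tokens n stA stB →
      pvRel bounds_of_tokens n
        (idxs.foldl (pvStepA bounds_of_tokens classes_list token_labels) stA)
        (idxs.foldl (pvRunsStep classes_list token_labels) stB) := by
  intro idxs
  induction idxs with
  | nil => intro stA stB _ h; exact h
  | cons i rest ih =>
    intro stA stB hmem h
    simp only [List.foldl_cons]
    exact ih _ _ (fun j hj => hmem j (List.mem_cons_of_mem _ hj))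
      (pvStep_rel bounds_of_tokens classes_list token_labels n stA stB i
        (hmem i (List.mem_cons_self)) h)

-- bounds[-1] = bounds[n-1] when n = len bounds > 0 (both through getD (0,0))
lemma pvLast_eq (bounds_of_tokens : List (Int × Int)) (h : 0 < bounds_of_tokens.length) :
    PySem.List.pyGet? bounds_of_tokens (-1)
      = PySem.List.pyGet? bounds_of_tokens ((bounds_of_tokens.length : Int) - 1) := by
  have : ((bounds_of_tokens.length : Int) - 1) = ((bounds_of_tokens.length - 1 : Nat) : Int) := by
    omega
  rw [this, PySem.List.pyGet?_natCast, PySem.List.pyGet?_neg_one,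
    List.getLast?_eq_getElem?]

lemma pvFinish_eq (bounds_of_tokens : List (Int × Int))
    (stA : PySem.Dict String (List (Int × Int)) × Int × String)
    (stB : List (String × Int × Int) × Option (String × Int))
    (h : pvRel bounds_of_tokens (PySem.List.len bounds_of_tokens) stA stB) :
    (if stA.2.1 ≥ 0 then
        pvEmit stA.1 stA.2.2 (((PySem.List.pyGet? bounds_of_tokens stA.2.1).getD (0, 0)).1,
          ((PySem.List.pyGet? bounds_of_tokens (-1)).getD (0, 0)).2)
      else stA.1).items
      = ((match stB.2 with
          | some cur => stB.1 ++ [(cur.1, cur.2, PySem.List.len bounds_of_tokens - 1)]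
          | none => stB.1).foldl (pvAddSpan bounds_of_tokens) PySem.Dict.empty).items := by
  obtain ⟨hd, hst⟩ := h
  rcases hst with ⟨hs, hopen⟩ | ⟨hs0, hsn, hopen⟩
  · simp only [hopen]
    rw [if_neg (by omega), hd]
  · simp only [hopen]
    rw [if_pos (by omega), List.foldl_append]
    simp only [List.foldl_cons, List.foldl_nil]
    rw [hd]
    have hn : 0 < bounds_of_tokens.length := by
      simp only [PySem.List.len_eq] at hsn; omega
    simp only [pvAddSpan, PySem.List.len_eq]
    rw [pvLast_eq bounds_of_tokens hn]

-- STAGE 2: the run list equals the zip of the boundary filters.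
def pvStarts (classes_list : List String) (token_labels : List Int) (i : Int) : List Int :=
  (PySem.List.pyRange 0 i 1).filter (pvBegins classes_list token_labels)

def pvEnds (classes_list : List String) (token_labels : List Int) (n i : Int) : List Int :=
  (PySem.List.pyRange 0 i 1).filter (pvEndsAt classes_list token_labels n)

def pvResolve (classes_list : List String) (token_labels : List Int) (se : Int × Int) :
    String × Int × Int :=
  ((pvTyp? classes_list token_labels se.1).getD "", se.1, se.2)

def pvZ (classes_list : List String) (token_labels : List Int) (n i : Int) :
    List (String × Int × Int) :=
  ((pvStarts classes_list token_labels i).zip (pvEnds classes_list token_labels n i)).map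
    (pvResolve classes_list token_labels)

-- loop invariant of the run machine against the boundary filters
def pvInv (classes_list : List String) (token_labels : List Int) (n i : Int)
    (st : List (String × Int × Int) × Option (String × Int)) : Prop :=
  match st.2 with
  | none =>
      st.1 = pvZ classes_list token_labels n i ∧
      (pvStarts classes_list token_labels i).length
        = (pvEnds classes_list token_labels n i).length ∧
      (i = 0 ∨ pvTyp? classes_list token_labels (i - 1) = none)
  | some (ty, s) =>
      0 ≤ s ∧ s < i ∧ pvTyp? classes_list token_labels s = some ty ∧
      st.1 = pvZ classes_list token_labels n s ∧
      (pvStarts classes_list token_labels s).length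
        = (pvEnds classes_list token_labels n s).length ∧
      pvStarts classes_list token_labels i = pvStarts classes_list token_labels s ++ [s] ∧
      pvEnds classes_list token_labels n (i - 1) = pvEnds classes_list token_labels n s ∧
      (∀ j, s < j → j < i → pvTyp? classes_list token_labels j = some ty ∧
        pvBegins classes_list token_labels j = false)

lemma pvStarts_succ (classes_list : List String) (token_labels : List Int) (i : Int)
    (h : 0 ≤ i) :
    pvStarts classes_list token_labels (i + 1)
      = pvStarts classes_list token_labels i
        ++ (if pvBegins classes_list token_labels i then [i] else []) := by
  rw [pvStarts, pvStarts, PySem.List.pyRange_one_succ_right h, List.filter_append]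
  cases hb : pvBegins classes_list token_labels i <;> simp [List.filter, hb]

lemma pvEnds_succ (classes_list : List String) (token_labels : List Int) (n i : Int)
    (h : 0 ≤ i) :
    pvEnds classes_list token_labels n (i + 1)
      = pvEnds classes_list token_labels n i
        ++ (if pvEndsAt classes_list token_labels n i then [i] else []) := by
  rw [pvEnds, pvEnds, PySem.List.pyRange_one_succ_right h, List.filter_append]
  cases hb : pvEndsAt classes_list token_labels n i <;> simp [List.filter, hb]

lemma pvZ_append (classes_list : List String) (token_labels : List Int) (n s e i : Int)
    (ty : String)
    (hty : pvTyp? classes_list token_labels s = some ty)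
    (hlen : (pvStarts classes_list token_labels s).length
      = (pvEnds classes_list token_labels n s).length)
    (hS : pvStarts classes_list token_labels i = pvStarts classes_list token_labels s ++ [s])
    (hE : pvEnds classes_list token_labels n i = pvEnds classes_list token_labels n s ++ [e]) :
    pvZ classes_list token_labels n i = pvZ classes_list token_labels n s ++ [(ty, s, e)] := by
  rw [pvZ, hS, hE, List.zip_append hlen]
  simp [pvZ, pvResolve, hty]

lemma pvInv_step (classes_list : List String) (token_labels : List Int) (n i : Int)
    (h0 : 0 ≤ i) (hn : i < n) (st : List (String × Int × Int) × Option (String × Int))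
    (h : pvInv classes_list token_labels n i st) :
    pvInv classes_list token_labels n (i + 1) (pvRunsStep classes_list token_labels st i) := by
  obtain ⟨spans, cur⟩ := st
  have hii : i + 1 - 1 = i := by omega
  rcases cur with _ | ⟨ty, s⟩
  · -- closed state
    obtain ⟨hZ, hlen, hcl⟩ := h
    simp only [pvRunsStep]
    by_cases hc : (PySem.List.pyGet? token_labels i).getD 0 > 0 ∧
        PySem.Int.floordiv ((PySem.List.pyGet? token_labels i).getD 0 - 1) 2
          < PySem.List.len classes_list
    · have htyp : pvTyp? classes_list token_labels i
          = some ((PySem.List.pyGet? classes_list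
              (PySem.Int.floordiv ((PySem.List.pyGet? token_labels i).getD 0 - 1) 2)).getD "") := by
        simp only [pvTyp?]; rw [if_pos hc]
      have hbeg : pvBegins classes_list token_labels i = true := by
        rcases hcl with h0' | hnone
        · subst h0'; simp only [pvBegins]; rw [htyp]; simp
        · simp only [pvBegins]; rw [htyp, hnone]; simp
      simp only [if_pos hc, pvInv]
      refine ⟨h0, by omega, htyp, hZ, hlen, ?_, ?_, ?_⟩
      · rw [pvStarts_succ _ _ _ h0, hbeg]
        simp
      · rw [hii]
      · intro j hj1 hj2; omega
    · have htyp : pvTyp? classes_list token_labels i = none := by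
        simp only [pvTyp?]; rw [if_neg hc]
      have hbeg : pvBegins classes_list token_labels i = false := by
        simp only [pvBegins]; rw [htyp]; simp
      have hend : pvEndsAt classes_list token_labels n i = false := by
        simp only [pvEndsAt]; rw [htyp]; simp
      simp only [if_neg hc, pvInv]
      refine ⟨?_, ?_, Or.inr (by rw [hii]; exact htyp)⟩
      · rw [pvZ, pvStarts_succ _ _ _ h0, hbeg, pvEnds_succ _ _ _ _ h0, hend]
        simpa [pvZ] using hZ
      · rw [pvStarts_succ _ _ _ h0, hbeg, pvEnds_succ _ _ _ _ h0, hend]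
        simpa using hlen
  · -- open state with run (ty, s)
    obtain ⟨hs0, hsi, hty, hZs, hlen, hS, hE, hrun⟩ := h
    have hi1 : 0 ≤ i - 1 := by omega
    have hi1' : i - 1 + 1 = i := by omega
    have htyp_prev : pvTyp? classes_list token_labels (i - 1) = some ty := by
      by_cases hps : i - 1 = s
      · rw [hps]; exact hty
      · exact (hrun (i - 1) (by omega) (by omega)).1
    have hne : ¬ (i == 0) = true := by simp; omega
    simp only [pvRunsStep]
    by_cases hc : (PySem.List.pyGet? token_labels i).getD 0 > 0 ∧
        PySem.Int.floordiv ((PySem.List.pyGet? token_labels i).getD 0 - 1) 2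
          < PySem.List.len classes_list
    · have htyp : pvTyp? classes_list token_labels i
          = some ((PySem.List.pyGet? classes_list
              (PySem.Int.floordiv ((PySem.List.pyGet? token_labels i).getD 0 - 1) 2)).getD "") := by
        simp only [pvTyp?]; rw [if_pos hc]
      have hm01 : PySem.Int.mod ((PySem.List.pyGet? token_labels i).getD 0) 2 = 0 ∨
          PySem.Int.mod ((PySem.List.pyGet? token_labels i).getD 0) 2 = 1 := by
        have h1 := PySem.Int.mod_nonneg ((PySem.List.pyGet? token_labels i).getD 0)
          (by norm_num : (0:Int) < 2)
        have h2 := PySem.Int.mod_lt ((PySem.List.pyGet? token_labels i).getD 0)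
          (by norm_num : (0:Int) < 2)
        omega
      by_cases hcont : PySem.Int.mod ((PySem.List.pyGet? token_labels i).getD 0) 2 = 1 ∧
          (PySem.List.pyGet? classes_list
            (PySem.Int.floordiv ((PySem.List.pyGet? token_labels i).getD 0 - 1) 2)).getD "" = ty
      · -- continuation: state unchanged
        have hbeg : pvBegins classes_list token_labels i = false := by
          simp only [pvBegins]; rw [htyp, htyp_prev, hcont.1, hcont.2]; simp [hne]
        have hend : pvEndsAt classes_list token_labels n (i - 1) = false := by
          simp only [pvEndsAt]; rw [htyp_prev, hi1', htyp, hbeg]; simp; omega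
        simp only [if_pos hc, if_pos hcont, pvInv]
        refine ⟨hs0, by omega, hty, hZs, hlen, ?_, ?_, ?_⟩
        · rw [pvStarts_succ _ _ _ h0, hbeg, hS]; simp
        · rw [hii]
          calc pvEnds classes_list token_labels n i
              = pvEnds classes_list token_labels n (i - 1 + 1) := by rw [hi1']
            _ = pvEnds classes_list token_labels n (i - 1) := by
                rw [pvEnds_succ _ _ _ _ hi1, hend]; simp
            _ = pvEnds classes_list token_labels n s := hE
        · intro j hj1 hj2
          by_cases hji : j = i
          · subst hji
            exact ⟨by rw [htyp, hcont.2], hbeg⟩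
          · exact hrun j hj1 (by omega)
      · -- break: close (ty, s, i-1), open new run at i
        have hbeg : pvBegins classes_list token_labels i = true := by
          rcases hm01 with hm | hm
          · simp only [pvBegins]; rw [htyp, hm]; simp
          · have hngt : ¬ (PySem.List.pyGet? classes_list
                (PySem.Int.floordiv ((PySem.List.pyGet? token_labels i).getD 0 - 1) 2)).getD "" = ty :=
              fun hh => hcont ⟨hm, hh⟩
            simp only [pvBegins]; rw [htyp, htyp_prev]; simp
            exact Or.inr (by rwa [PySem.Int.floordiv_eq_ediv_of_pos
              (by norm_num : (0:Int) < 2)] at hngt)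
        have hend : pvEndsAt classes_list token_labels n (i - 1) = true := by
          simp only [pvEndsAt]; rw [htyp_prev, hi1', hbeg]; simp
        have hEi : pvEnds classes_list token_labels n i
            = pvEnds classes_list token_labels n s ++ [i - 1] := by
          calc pvEnds classes_list token_labels n i
              = pvEnds classes_list token_labels n (i - 1 + 1) := by rw [hi1']
            _ = pvEnds classes_list token_labels n (i - 1) ++ [i - 1] := by
                rw [pvEnds_succ _ _ _ _ hi1, hend]; simp
            _ = pvEnds classes_list token_labels n s ++ [i - 1] := by rw [hE]
        simp only [if_pos hc, if_neg hcont, pvInv]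
        refine ⟨h0, by omega, htyp, ?_, ?_, ?_, ?_, ?_⟩
        · rw [pvZ_append classes_list token_labels n s (i - 1) i ty hty hlen hS hEi]
          exact congrArg (fun t => t ++ [(ty, s, i - 1)]) hZs
        · rw [hS, hEi]; simp [hlen]
        · rw [pvStarts_succ _ _ _ h0, hbeg]; simp
        · rw [hii]
        · intro j hj1 hj2; omega
    · -- invalid token: close (ty, s, i-1)
      have htyp : pvTyp? classes_list token_labels i = none := by
        simp only [pvTyp?]; rw [if_neg hc]
      have hbeg : pvBegins classes_list token_labels i = false := by
        simp only [pvBegins]; rw [htyp]; simp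
      have hendi : pvEndsAt classes_list token_labels n i = false := by
        simp only [pvEndsAt]; rw [htyp]; simp
      have hend : pvEndsAt classes_list token_labels n (i - 1) = true := by
        simp only [pvEndsAt]; rw [htyp_prev, hi1', htyp]; simp
      have hEi : pvEnds classes_list token_labels n i
          = pvEnds classes_list token_labels n s ++ [i - 1] := by
        calc pvEnds classes_list token_labels n i
            = pvEnds classes_list token_labels n (i - 1 + 1) := by rw [hi1']
          _ = pvEnds classes_list token_labels n (i - 1) ++ [i - 1] := by
              rw [pvEnds_succ _ _ _ _ hi1, hend]; simp
          _ = pvEnds classes_list token_labels n s ++ [i - 1] := by rw [hE]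
      simp only [if_neg hc, pvInv]
      refine ⟨?_, ?_, Or.inr (by rw [hii]; exact htyp)⟩
      · have hZi : pvZ classes_list token_labels n i
            = pvZ classes_list token_labels n s ++ [(ty, s, i - 1)] :=
          pvZ_append classes_list token_labels n s (i - 1) i ty hty hlen hS hEi
        have hstep : pvZ classes_list token_labels n (i + 1)
            = pvZ classes_list token_labels n i := by
          rw [pvZ, pvZ, pvStarts_succ _ _ _ h0, hbeg, pvEnds_succ _ _ _ _ h0, hendi]
          simp
        rw [hstep, hZi]
        exact congrArg (fun t => t ++ [(ty, s, i - 1)]) hZs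
      · rw [pvStarts_succ _ _ _ h0, hbeg, pvEnds_succ _ _ _ _ h0, hendi]
        simp [hS, hEi, hlen]

lemma pvInv_loop (classes_list : List String) (token_labels : List Int) (n : Int) :
    ∀ (m : Nat), (m : Int) ≤ n →
      pvInv classes_list token_labels n m
        ((PySem.List.pyRange 0 (m : Int) 1).foldl (pvRunsStep classes_list token_labels)
          ([], none)) := by
  intro m
  induction m with
  | zero =>
    intro _
    rw [PySem.List.pyRange_one_eq_nil (by norm_num)]
    simp [pvInv, pvZ, pvStarts, pvEnds, PySem.List.pyRange_one_eq_nil]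
  | succ m ih =>
    intro hm
    have hcast : ((m + 1 : Nat) : Int) = (m : Int) + 1 := by push_cast; ring
    rw [hcast, PySem.List.pyRange_one_succ_right (by positivity), List.foldl_append]
    simp only [List.foldl_cons, List.foldl_nil]
    exact pvInv_step classes_list token_labels n m (by positivity) (by omega) _
      (ih (by omega))

lemma pvRunsFinal_eq (classes_list : List String) (token_labels : List Int) (m : Nat) :
    pvRunsFinal classes_list token_labels (m : Int)
      = pvZ classes_list token_labels (m : Int) (m : Int) := by
  have hinv := pvInv_loop classes_list token_labels (m : Int) m le_rfl
  rw [pvRunsFinal]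
  rcases hst : ((PySem.List.pyRange 0 (m : Int) 1).foldl (pvRunsStep classes_list token_labels)
      ([], none)) with ⟨spans, cur⟩
  rw [hst] at hinv
  rcases cur with _ | ⟨ty, s⟩
  · exact hinv.1
  · obtain ⟨hs0, hsi, hty, hZs, hlen, hS, hE, hrun⟩ := hinv
    have hm1 : 0 ≤ (m : Int) - 1 := by omega
    have hm1' : (m : Int) - 1 + 1 = (m : Int) := by omega
    have htyp_last : pvTyp? classes_list token_labels ((m : Int) - 1) = some ty := by
      by_cases hps : (m : Int) - 1 = s
      · rw [hps]; exact hty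
      · exact (hrun _ (by omega) (by omega)).1
    have hend : pvEndsAt classes_list token_labels (m : Int) ((m : Int) - 1) = true := by
      simp only [pvEndsAt]; rw [htyp_last]; simp
    have hEm : pvEnds classes_list token_labels (m : Int) (m : Int)
        = pvEnds classes_list token_labels (m : Int) s ++ [(m : Int) - 1] := by
      calc pvEnds classes_list token_labels (m : Int) (m : Int)
          = pvEnds classes_list token_labels (m : Int) ((m : Int) - 1 + 1) := by rw [hm1']
        _ = pvEnds classes_list token_labels (m : Int) ((m : Int) - 1) ++ [(m : Int) - 1] := by
            rw [pvEnds_succ _ _ _ _ hm1, hend]; simp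
        _ = pvEnds classes_list token_labels (m : Int) s ++ [(m : Int) - 1] := by rw [hE]
    rw [pvZ_append classes_list token_labels (m : Int) s ((m : Int) - 1) (m : Int) ty
      hty hlen hS hEm, hZs]

-- ===== VERDICT (by name: the statement is the Claim_ definition above) =====
theorem calculate_bounds_of_named_entities_spec : Claim_equal_calculate_bounds_of_named_entities := by
  intro bounds classes labels _ _
  unfold Spec_calculate_bounds_of_named_entities
  unfold calculate_bounds_of_named_entities calculate_bounds_of_named_entities_alt
  have h1 := pvFinish_eq bounds _ _
    (pvLoop_rel bounds classes labels (PySem.List.len bounds)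
      (PySem.List.pyRange 0 (PySem.List.len bounds) 1)
      (PySem.Dict.empty, -1, "") ([], none)
      (fun i hi => by
        have := (PySem.List.mem_pyRange_one (a := 0) (b := PySem.List.len bounds) (x := i)).1 hi
        exact ⟨this.1, this.2⟩)
      ⟨rfl, Or.inl ⟨by norm_num, rfl⟩⟩)
  refine h1.trans ?_
  have h2 : (match ((PySem.List.pyRange 0 (PySem.List.len bounds) 1).foldl
        (pvRunsStep classes labels) ([], none)).2 with
      | some cur => ((PySem.List.pyRange 0 (PySem.List.len bounds) 1).foldl
          (pvRunsStep classes labels) ([], none)).1 ++ [(cur.1, cur.2, PySem.List.len bounds - 1)]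
      | none => ((PySem.List.pyRange 0 (PySem.List.len bounds) 1).foldl
          (pvRunsStep classes labels) ([], none)).1)
      = pvZ classes labels (PySem.List.len bounds) (PySem.List.len bounds) := by
    have := pvRunsFinal_eq classes labels bounds.length
    simpa [pvRunsFinal, PySem.List.len_eq] using this
  rw [h2]
  rw [pvZ, List.foldl_map]
  rfl
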